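-- pv_equiv track=rewrite | github.com/reslp/LFS-cazy-comparative | bin/get_functional_for_cafe_families.py | extract_interpro
-- ===== SOURCE A (Python) =====
-- def extract_interpro(ann_str):
-- 	iplist = []
-- 	for annot in ann_str.split(";"):
-- 		if "InterPro" in annot:
-- 			for interpro in annot.split(","):
-- 				if "InterPro" in interpro.split(":")[0]:
-- 					iplist.append(interpro.split(":")[-1])
-- 	return iplist
-- ===== SOURCE B (Python) =====
-- def extract_interpro(ann_str):
--     iplist = []
--     tok = ""
--     for ch in ann_str + ",":
--         if ch == "," or ch == ";":
--             if "InterPro" in tok.partition(":")[0]: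
--                 iplist.append(tok.rpartition(":")[2])
--             tok = ""
--         else:
--             tok += ch
--     return iplist
-- ===== Notes on version B (the rewrite author's own statement) =====
-- stated objective: alternative
-- what changed: B replaces A's two nested split loops by a single character scan with an explicit token accumulator: it walks the string once (with a trailing sentinel delimiter), flushing the accumulated token at each ',' or ';' and using partition/rpartition instead of split(":") to test and extract.
import Mathlib
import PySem

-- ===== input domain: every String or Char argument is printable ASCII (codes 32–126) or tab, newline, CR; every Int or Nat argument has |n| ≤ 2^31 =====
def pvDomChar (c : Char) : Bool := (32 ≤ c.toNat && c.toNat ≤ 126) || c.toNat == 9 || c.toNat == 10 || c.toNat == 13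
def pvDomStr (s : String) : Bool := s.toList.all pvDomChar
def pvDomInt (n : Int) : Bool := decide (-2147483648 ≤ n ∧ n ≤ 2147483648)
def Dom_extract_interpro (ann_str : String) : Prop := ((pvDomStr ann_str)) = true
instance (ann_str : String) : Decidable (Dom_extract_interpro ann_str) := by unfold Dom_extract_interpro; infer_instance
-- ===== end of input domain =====

-- B replaces A's two nested split loops by a single character scan with an explicit
-- token accumulator (flushing at each ',' or ';', sentinel delimiter at the end),
-- using partition/rpartition instead of split(":"); objective: alternative.

-- ===== PORT A =====
-- Python s.split(sep) for a nonempty literal sep (PySem.Chars.splitOn is that form)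
def pySplit (s sep : String) : List String :=
  (PySem.Chars.splitOn s.toList sep.toList).map String.ofList

-- split(":")[0] / [-1] via PySem.List.pyGet?; split never returns [], so the
-- getD "" default is never used (no IndexError is reachable).
def extract_interpro (ann_str : String) : List String :=
  (pySplit ann_str ";").foldl (fun iplist annot =>
    if PySem.Str.isIn "InterPro" annot then
      (pySplit annot ",").foldl (fun ipl interpro =>
        if PySem.Str.isIn "InterPro" ((PySem.List.pyGet? (pySplit interpro ":") 0).getD "") then
          ipl ++ [(PySem.List.pyGet? (pySplit interpro ":") (-1)).getD ""]
        else ipl) iplist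
    else iplist) []

-- ===== PORT B =====
-- tok.partition(":")[0] is the prefix before the first ':' = takeWhile (· != ':');
-- tok.rpartition(":")[2] is the suffix after the last ':' = reverse of takeWhile on the
-- reverse (both equal the whole token when no ':' occurs, exactly as in Python).
def bFlush (tok : List Char) (iplist : List String) : List String :=
  if PySem.Chars.isIn "InterPro".toList (tok.takeWhile (· != ':')) then
    iplist ++ [String.ofList (tok.reverse.takeWhile (· != ':')).reverse]
  else iplist

-- the for-loop over the characters of ann_str + ",": state = (current token, output)
def bLoop : List Char → List Char → List String → List String
  | [], _, iplist => iplist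
  | ch :: rest, tok, iplist =>
    if ch = ',' ∨ ch = ';' then bLoop rest [] (bFlush tok iplist)
    else bLoop rest (tok ++ [ch]) iplist

def extract_interpro_alt (ann_str : String) : List String :=
  bLoop (ann_str.toList ++ [',']) [] []

-- ===== PRECONDITION & SPEC =====
def Spec_extract_interpro (ann_str : String) (out : List String) : Prop := out = extract_interpro_alt ann_str
instance (ann_str : String) (out : List String) : Decidable (Spec_extract_interpro ann_str out) := by unfold Spec_extract_interpro; infer_instance

-- ===== CLAIM (what is proved, stated in full; the proofs are below) =====
def Claim_equal_extract_interpro : Prop := ∀ (ann_str : String), Dom_extract_interpro ann_str → Spec_extract_interpro ann_str (extract_interpro ann_str)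

-- ===== LEMMAS AND PROOFS =====

-- a simple structural model of splitting a char list on a single character
def tokens (c : Char) : List Char → List (List Char)
  | [] => [[]]
  | x :: t =>
    if x = c then [] :: tokens c t
    else
      match tokens c t with
      | [] => [[x]]
      | h :: tt => (x :: h) :: tt

theorem tokens_ne_nil (c : Char) (l : List Char) : tokens c l ≠ [] := by
  cases l with
  | nil => simp [tokens]
  | cons x t =>
    simp only [tokens]
    split
    · simp
    · split <;> simp_all

theorem splitOn_go_eq (c : Char) :
    ∀ (fuel : Nat) (l cur : List Char) (acc : List (List Char)), l.length ≤ fuel →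
      PySem.Chars.splitOn.go [c] fuel l cur acc =
        acc.reverse ++ (match tokens c l with
          | [] => [cur.reverse]
          | h :: tt => (cur.reverse ++ h) :: tt) := by
  intro fuel
  induction fuel with
  | zero =>
    intro l cur acc hl
    interval_cases h : l.length
    have : l = [] := List.length_eq_zero_iff.mp h
    subst this
    simp [PySem.Chars.splitOn.go, tokens]
  | succ f ih =>
    intro l cur acc hl
    cases l with
    | nil => simp [PySem.Chars.splitOn.go, tokens]
    | cons x t =>
      by_cases hx : x = c
      · subst hx
        rw [PySem.Chars.splitOn.go]
        simp only [List.isPrefixOf, BEq.rfl, Bool.and_eq_true]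
        rw [if_pos (by simp)]
        simp only [List.length_cons, List.drop_succ_cons, List.length_nil, List.drop_zero]
        rw [ih t [] (cur.reverse :: acc) (by simpa using Nat.le_of_succ_le_succ (by simpa using hl))]
        rcases hh : tokens x t with _ | ⟨h, tt⟩
        · exact absurd hh (tokens_ne_nil x t)
        · simp [tokens, hh]
      · rw [PySem.Chars.splitOn.go]
        rw [if_neg (by simp [List.isPrefixOf]; intro h; exact (hx (by simpa using h.symm)).elim)]
        rw [ih t (x :: cur) acc (by simpa using Nat.le_of_succ_le_succ (by simpa using hl))]
        rcases hh : tokens c t with _ | ⟨h, tt⟩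
        · exact absurd hh (tokens_ne_nil c t)
        · simp [tokens, hx, hh]

theorem splitOn_eq_tokens (c : Char) (l : List Char) :
    PySem.Chars.splitOn l [c] = tokens c l := by
  rw [PySem.Chars.splitOn, splitOn_go_eq c (l.length+1) l [] [] (by omega)]
  rcases hh : tokens c l with _ | ⟨h, tt⟩
  · exact absurd hh (tokens_ne_nil c l)
  · simp

theorem tokens_head_prefix (c : Char) (l : List Char) : ∀ (h : List Char) (tt : List (List Char)),
    tokens c l = h :: tt → h <+: l := by
  induction l with
  | nil => intro h tt he; simp [tokens] at he; simp [he.1]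
  | cons x t ih =>
    intro h tt he
    by_cases hx : x = c
    · simp [tokens, hx] at he
      simp [he.1]
    · rcases hh : tokens c t with _ | ⟨h', tt'⟩
      · exact absurd hh (tokens_ne_nil c t)
      · simp [tokens, hx, hh] at he
        rcases he with ⟨he1, _⟩
        subst he1
        exact List.cons_prefix_cons.mpr ⟨rfl, ih h' tt' hh⟩

theorem tokens_mem_infix (c : Char) (l : List Char) : ∀ tok, tok ∈ tokens c l → tok <:+: l := by
  induction l with
  | nil => intro tok hm; simp [tokens] at hm; simp [hm]
  | cons x t ih =>
    intro tok hm
    by_cases hx : x = c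
    · simp [tokens, hx] at hm
      rcases hm with rfl | hm
      · exact List.nil_infix
      · exact (ih tok hm).trans (List.infix_cons (List.infix_refl t))
    · rcases hh : tokens c t with _ | ⟨h', tt'⟩
      · exact absurd hh (tokens_ne_nil c t)
      · simp [tokens, hx, hh] at hm
        rcases hm with rfl | hm
        · exact (List.cons_prefix_cons.mpr ⟨rfl, tokens_head_prefix c t h' tt' hh⟩).isInfix
        · have : tok ∈ tokens c t := by rw [hh]; exact List.mem_cons_of_mem _ hm
          exact (ih tok this).trans (List.infix_cons (List.infix_refl t))

-- char-level per-token test and projection (shared abstraction of both sides)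
def tokP (tok : List Char) : Bool := PySem.Chars.isIn "InterPro".toList (tokens ':' tok).headI
def tokF (tok : List Char) : String := String.ofList (tokens ':' tok).getLastI

theorem pyGet_neg_one {α : Type} (xs : List α) : PySem.List.pyGet? xs (-1) = xs.getLast? := by
  cases xs with
  | nil => rfl
  | cons x t =>
    simp [PySem.List.pyGet?, PySem.List.pyIdx?, List.getLast?_eq_getElem?]

theorem body_eq (tok : List Char) (acc : List String) :
    (if PySem.Str.isIn "InterPro" ((PySem.List.pyGet? (pySplit (String.ofList tok) ":") 0).getD "") then
       acc ++ [(PySem.List.pyGet? (pySplit (String.ofList tok) ":") (-1)).getD ""]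
     else acc) = if tokP tok then acc ++ [tokF tok] else acc := by
  have hsp : pySplit (String.ofList tok) ":" = (tokens ':' tok).map String.ofList := by
    rw [pySplit, String.toList_ofList, show (":" : String).toList = [':'] from rfl,
      splitOn_eq_tokens]
  rcases hh : tokens ':' tok with _ | ⟨h, tt⟩
  · exact absurd hh (tokens_ne_nil ':' tok)
  · rw [hsp, hh]
    have h0 : PySem.List.pyGet? ((h :: tt).map String.ofList) 0 = some (String.ofList h) := by
      simp [PySem.List.pyGet?, PySem.List.pyIdx?]
    have hlast : (PySem.List.pyGet? ((h :: tt).map String.ofList) (-1)).getD "" = tokF tok := by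
      rw [pyGet_neg_one, List.getLast?_map]
      rcases hl : (h :: tt).getLast? with _ | y
      · simp at hl
      · rw [tokF, hh, List.getLastI_eq_getLast?_getD, hl]
        rfl
    have hp : PySem.Str.isIn "InterPro" (String.ofList h) = tokP tok := by
      rw [PySem.Str.isIn_eq, String.toList_ofList, tokP, hh]
      simp
    rw [h0, hlast]
    simp only [Option.getD_some]
    have hp2 : PySem.Chars.isIn ['I','n','t','e','r','P','r','o'] h = tokP tok := by
      simpa using hp
    simp [hp2]

theorem inner_eq (a : List Char) (acc : List String) :
    (pySplit (String.ofList a) ",").foldl (fun ipl interpro =>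
        if PySem.Str.isIn "InterPro" ((PySem.List.pyGet? (pySplit interpro ":") 0).getD "") then
          ipl ++ [(PySem.List.pyGet? (pySplit interpro ":") (-1)).getD ""]
        else ipl) acc =
      acc ++ ((tokens ',' a).filter tokP).map tokF := by
  rw [pySplit, String.toList_ofList, show ("," : String).toList = [','] from rfl,
    splitOn_eq_tokens, List.foldl_map]
  refine Eq.trans (PySem.List.foldl_congr_mem _ _
    (fun acc tok => if tokP tok then acc ++ [tokF tok] else acc) acc
    (fun acc x _ => body_eq x acc)) ?_
  exact PySem.List.foldl_append_if tokP tokF _ _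

theorem filter_nil_of_not_guard (a : List Char)
    (hg : PySem.Chars.isIn "InterPro".toList a = false) :
    (tokens ',' a).filter tokP = [] := by
  rw [List.filter_eq_nil_iff]
  intro tok hm hp
  rcases hh : tokens ':' tok with _ | ⟨h, tt⟩
  · exact absurd hh (tokens_ne_nil ':' tok)
  · rw [tokP, hh] at hp
    simp only [List.headI] at hp
    have h1 : ("InterPro" : String).toList <:+: h := (PySem.Chars.isIn_iff_infix _ _).mp hp
    have h2 : h <+: tok := tokens_head_prefix ':' tok h tt hh
    have h3 : tok <:+: a := tokens_mem_infix ',' a tok hm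
    have : ("InterPro" : String).toList <:+: a := (h1.trans h2.isInfix).trans h3
    rw [(PySem.Chars.isIn_iff_infix _ _).mpr this] at hg
    exact Bool.true_eq_false.mp hg

-- A's result, characterised
theorem extract_interpro_eq (s : String) :
    extract_interpro s =
      (tokens ';' s.toList).flatMap (fun a => ((tokens ',' a).filter tokP).map tokF) := by
  rw [extract_interpro, pySplit, show (";" : String).toList = [';'] from rfl,
    splitOn_eq_tokens, List.foldl_map]
  refine Eq.trans (PySem.List.foldl_congr_mem _ _
    (fun acc a => acc ++ ((tokens ',' a).filter tokP).map tokF) []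
    (fun acc a _ => ?_)) ?_
  · by_cases hg : PySem.Chars.isIn "InterPro".toList a = true
    · rw [if_pos (by rw [PySem.Str.isIn_eq]; simpa using hg)]
      exact inner_eq a acc
    · rw [if_neg (by rw [PySem.Str.isIn_eq]; simpa using hg)]
      simp [filter_nil_of_not_guard a (by simpa using hg)]
  · rw [PySem.List.foldl_append_eq_flatMap]
    simp

-- ---- B-side lemmas: the character scan computes the same token decomposition ----

-- splitting on ',' or ';' simultaneously
def tokens2 : List Char → List (List Char)
  | [] => [[]]
  | x :: t =>
    if x = ',' ∨ x = ';' then [] :: tokens2 t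
    else
      match tokens2 t with
      | [] => [[x]]
      | h :: tt => (x :: h) :: tt

-- the combined split is the flattening of A's nested splits
theorem tokens2_eq_flatMap (l : List Char) :
    tokens2 l = (tokens ';' l).flatMap (fun a => tokens ',' a) := by
  induction l with
  | nil => simp [tokens2, tokens]
  | cons x t ih =>
    by_cases hsemi : x = ';'
    · subst hsemi
      rcases hh : tokens ';' t with _ | ⟨h, tt⟩
      · exact absurd hh (tokens_ne_nil ';' t)
      · simp only [show tokens2 (';' :: t) = [] :: tokens2 t from by simp [tokens2], ih,
          show tokens ';' (';' :: t) = [] :: tokens ';' t from by simp [tokens]]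
        simp [tokens]
    · rcases hh : tokens ';' t with _ | ⟨h, tt⟩
      · exact absurd hh (tokens_ne_nil ';' t)
      · have htx : tokens ';' (x :: t) = (x :: h) :: tt := by simp [tokens, hsemi, hh]
        rcases hh2 : tokens ',' h with _ | ⟨h2, tt2⟩
        · exact absurd hh2 (tokens_ne_nil ',' h)
        · by_cases hcomma : x = ','
          · subst hcomma
            rw [show tokens2 (',' :: t) = [] :: tokens2 t from by simp [tokens2], ih, htx]
            simp [tokens, hh2, hh]
          · have h2x : tokens2 (x :: t) =
                match tokens2 t with
                | [] => [[x]]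
                | h :: tt => (x :: h) :: tt := by
              simp [tokens2, hcomma, hsemi]
            rw [h2x, ih, hh, htx]
            simp only [List.flatMap_cons, hh2, List.cons_append]
            simp [tokens, hcomma, hh2]

-- snoc recurrence for tokens
def snocLast (x : Char) : List (List Char) → List (List Char)
  | [] => [[x]]
  | [h] => [h ++ [x]]
  | h :: t => h :: snocLast x t

theorem tokens_snoc (c x : Char) (l : List Char) :
    tokens c (l ++ [x]) =
      if x = c then tokens c l ++ [[]] else snocLast x (tokens c l) := by
  induction l with
  | nil =>
    by_cases hx : x = c <;> simp [tokens, hx, snocLast]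
  | cons y t ih =>
    by_cases hy : y = c
    · subst hy
      rw [List.cons_append, show tokens y (y :: (t ++ [x])) = [] :: tokens y (t ++ [x]) from by
        simp [tokens], ih]
      by_cases hx : x = y
      · simp [hx, tokens]
      · rcases hh : tokens y t with _ | ⟨h, tt⟩
        · exact absurd hh (tokens_ne_nil y t)
        · simp [hx, tokens, hh, snocLast]
    · rcases hh : tokens c t with _ | ⟨h, tt⟩
      · exact absurd hh (tokens_ne_nil c t)
      · have hyt : tokens c (y :: t) = (y :: h) :: tt := by simp [tokens, hy, hh]
        rw [List.cons_append]
        by_cases hx : x = c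
        · have : tokens c (t ++ [x]) = tokens c t ++ [[]] := by rw [ih, if_pos hx]
          rw [show tokens c (y :: (t ++ [x])) =
              match tokens c (t ++ [x]) with
              | [] => [[y]]
              | h :: tt => (y :: h) :: tt from by simp [tokens, hy]]
          rw [this, hh, hyt, if_pos hx]
          simp
        · have : tokens c (t ++ [x]) = snocLast x (tokens c t) := by rw [ih, if_neg hx]
          rw [show tokens c (y :: (t ++ [x])) =
              match tokens c (t ++ [x]) with
              | [] => [[y]]
              | h :: tt => (y :: h) :: tt from by simp [tokens, hy]]
          rw [this, hh, hyt, if_neg hx]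
          cases tt with
          | nil => simp [snocLast]
          | cons h1 t1 => simp [snocLast]

theorem getLastI_snocLast (x : Char) (xs : List (List Char)) (hne : xs ≠ []) :
    (snocLast x xs).getLastI = xs.getLastI ++ [x] := by
  induction xs with
  | nil => exact absurd rfl hne
  | cons h t ih =>
    cases t with
    | nil => simp [snocLast, List.getLastI]
    | cons h1 t1 =>
      have h1t : snocLast x (h :: h1 :: t1) = h :: snocLast x (h1 :: t1) := by
        rfl
      have h2 : snocLast x (h1 :: t1) ≠ [] := by
        cases t1 <;> simp [snocLast]
      have hcc : ∀ (a b : List Char) (l : List (List Char)),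
          (a :: b :: l).getLastI = (b :: l).getLastI := by
        intro a b l
        simp [List.getLastI_eq_getLast?_getD, List.getLast?_cons_cons]
      have ih' := ih (by simp)
      rcases hs : snocLast x (h1 :: t1) with _ | ⟨s, ss⟩
      · exact absurd hs h2
      · rw [hs] at ih'
        rw [h1t, hs, hcc, ih', hcc]

-- the last token of tokens c l is the suffix after the last c
theorem tokens_getLastI (c : Char) (l : List Char) :
    (tokens c l).getLastI = (l.reverse.takeWhile (· != c)).reverse := by
  induction l using List.reverseRecOn with
  | nil => simp [tokens, List.getLastI]
  | append_singleton l x ih =>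
    rw [tokens_snoc]
    by_cases hx : x = c
    · subst hx
      rw [if_pos rfl]
      rcases hh : tokens x l with _ | ⟨h, tt⟩
      · exact absurd hh (tokens_ne_nil x l)
      · rw [List.getLastI_eq_getLast?_getD, List.getLast?_concat]
        simp
    · rw [if_neg hx, getLastI_snocLast x _ (tokens_ne_nil c l), ih]
      have : (x != c) = true := by simp [hx]
      simp [this]

-- the first token of tokens c l is the prefix before the first c
theorem tokens_headI (c : Char) (l : List Char) :
    (tokens c l).headI = l.takeWhile (· != c) := by
  induction l with
  | nil => simp [tokens]
  | cons x t ih =>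
    by_cases hx : x = c
    · subst hx
      simp [tokens, List.takeWhile]
    · rcases hh : tokens c t with _ | ⟨h, tt⟩
      · exact absurd hh (tokens_ne_nil c t)
      · have : (x != c) = true := by simp [hx]
        simp [tokens, hx, hh, List.takeWhile, this, ← ih]

theorem bFlush_eq (tok : List Char) (acc : List String) :
    bFlush tok acc = if tokP tok then acc ++ [tokF tok] else acc := by
  rw [bFlush, tokP, tokF, tokens_headI, tokens_getLastI]

theorem tokens2_nodelim (l : List Char) (h : ∀ y ∈ l, ¬(y = ',' ∨ y = ';')) :
    tokens2 l = [l] := by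
  induction l with
  | nil => simp [tokens2]
  | cons x t ih =>
    have hx : ¬(x = ',' ∨ x = ';') := h x (by simp)
    have ht : tokens2 t = [t] := ih (fun y hy => h y (by simp [hy]))
    simp [tokens2, hx, ht]

theorem tokens2_split (tok : List Char) (ch : Char) (rest : List Char)
    (htok : ∀ y ∈ tok, ¬(y = ',' ∨ y = ';')) (hch : ch = ',' ∨ ch = ';') :
    tokens2 (tok ++ ch :: rest) = tok :: tokens2 rest := by
  induction tok with
  | nil => simp [tokens2, hch]
  | cons x t ih =>
    have hx : ¬(x = ',' ∨ x = ';') := htok x (by simp)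
    have ht : tokens2 (t ++ ch :: rest) = t :: tokens2 rest :=
      ih (fun y hy => htok y (by simp [hy]))
    simp [tokens2, hx, ht]

-- loop invariant for B's character scan
theorem bLoop_eq (cs : List Char) : ∀ (tok : List Char) (acc : List String),
    (∀ y ∈ tok, ¬(y = ',' ∨ y = ';')) →
    bLoop (cs ++ [',']) tok acc = acc ++ ((tokens2 (tok ++ cs)).filter tokP).map tokF := by
  induction cs with
  | nil =>
    intro tok acc htok
    rw [show tok ++ [] = tok from by simp, tokens2_nodelim tok htok]
    simp only [List.nil_append, bLoop, bFlush_eq]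
    by_cases hp : tokP tok <;> simp [List.filter, hp]
  | cons ch rest ih =>
    intro tok acc htok
    by_cases hch : ch = ',' ∨ ch = ';'
    · rw [List.cons_append, show bLoop (ch :: (rest ++ [','])) tok acc =
          bLoop (rest ++ [',']) [] (bFlush tok acc) from by rw [bLoop, if_pos hch]]
      rw [ih [] (bFlush tok acc) (by simp), tokens2_split tok ch rest htok hch,
        bFlush_eq]
      by_cases hp : tokP tok <;> simp [List.filter, hp]
    · rw [List.cons_append, show bLoop (ch :: (rest ++ [','])) tok acc =
          bLoop (rest ++ [',']) (tok ++ [ch]) acc from by rw [bLoop, if_neg hch]]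
      rw [ih (tok ++ [ch]) acc (by
        intro y hy
        rcases List.mem_append.mp hy with h1 | h1
        · exact htok y h1
        · simp at h1; subst h1; exact hch)]
      simp

-- B's result, characterised
theorem extract_interpro_alt_eq (s : String) :
    extract_interpro_alt s = ((tokens2 s.toList).filter tokP).map tokF := by
  rw [extract_interpro_alt, bLoop_eq s.toList [] [] (by simp)]
  simp

-- ===== VERDICT (by name: the statement is the Claim_ definition above) =====
theorem extract_interpro_spec : Claim_equal_extract_interpro := by
  intro s _
  show extract_interpro s = extract_interpro_alt s
  rw [extract_interpro_eq, extract_interpro_alt_eq, tokens2_eq_flatMap,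
    List.filter_flatMap, List.map_flatMap]
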